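-- pv_equiv track=rewrite | github.com/swami086/Zovark_swami | worker/activities/network_analysis.py | _extract_zeek_fields
-- ===== SOURCE A (Python) =====
-- from typing import Dict, List, Optional
--
-- def _extract_zeek_fields(lines: List[str]) -> tuple:
--     """Extract field names from Zeek header lines.
--
--     Returns (field_names, data_start_index)
--     """
--     fields = []
--     data_start = 0
--     for i, line in enumerate(lines):
--         if line.startswith("#fields"):
--             fields = line.split("\t")[1:]  # Skip "#fields" prefix
--             data_start = i + 1
--         elif line.startswith("#"):
--             data_start = i + 1
--         else:
--             break
--     return fields, data_start
-- ===== SOURCE B (Python) =====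
-- from typing import Dict, List, Optional
--
-- def _extract_zeek_fields(lines: List[str]) -> tuple:
--     """Extract field names from Zeek header lines.
--
--     Returns (field_names, data_start_index)
--     """
--     # Phase 1: collect the leading '#' header block.
--     header = []
--     for line in lines:
--         if line.startswith("#"):
--             header.append(line)
--         else:
--             break
--     # Phase 2: scan the header in reverse for the last '#fields' line.
--     fields = []
--     for line in reversed(header):
--         if line.startswith("#fields"):
--             fields = line.split("\t")[1:]
--             break
--     return fields, len(header)
-- ===== Notes on version B (the rewrite author's own statement) =====
-- stated objective: alternative
-- what changed: Replaced the single enumerate loop that overwrites fields on every '#fields' match with two phases: collect the leading '#' header block (data_start = its length), then reverse-scan it and stop at the first '#fields' hit (the last one forward).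
import Mathlib
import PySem

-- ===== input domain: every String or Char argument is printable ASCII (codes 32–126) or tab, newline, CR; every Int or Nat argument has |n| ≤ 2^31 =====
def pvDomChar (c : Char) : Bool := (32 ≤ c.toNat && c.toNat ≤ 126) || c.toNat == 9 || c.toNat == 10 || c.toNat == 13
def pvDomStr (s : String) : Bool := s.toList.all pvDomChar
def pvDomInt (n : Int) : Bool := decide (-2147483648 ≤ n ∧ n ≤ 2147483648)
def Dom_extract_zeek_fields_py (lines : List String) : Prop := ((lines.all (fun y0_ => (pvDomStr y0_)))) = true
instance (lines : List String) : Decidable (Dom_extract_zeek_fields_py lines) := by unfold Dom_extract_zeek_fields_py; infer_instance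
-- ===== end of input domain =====

-- B splits the work into two phases (collect the leading '#' header block, then reverse-scan it
-- for the last '#fields' line) instead of A's single overwrite-as-you-go loop; same cost, alternative structure.

-- ===== PORT A =====
-- literal port of A's enumerate loop: carries the running index i, fields and data_start
def pvALoop : List String → Int → List String → Int → List String × Int
  | [], _, fields, data_start => (fields, data_start)
  | l :: rest, i, fields, data_start =>
    if PySem.Str.startswith l "#fields" then
      pvALoop rest (i + 1) (((PySem.Str.split? l "\t").getD []).drop 1) (i + 1)
    else if PySem.Str.startswith l "#" then
      pvALoop rest (i + 1) fields (i + 1)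
    else (fields, data_start)

def extract_zeek_fields_py (lines : List String) : List String × Int :=
  pvALoop lines 0 [] 0

-- ===== PORT B =====
-- phase 1 of Source B: the leading block of lines starting with '#'
def pvTakeHeader : List String → List String
  | [] => []
  | l :: rest => if PySem.Str.startswith l "#" then l :: pvTakeHeader rest else []

-- phase 2 of Source B: first '#fields' hit of the reversed header (break on match)
def pvFindFieldsRev : List String → List String
  | [] => []
  | l :: rest =>
    if PySem.Str.startswith l "#fields" then ((PySem.Str.split? l "\t").getD []).drop 1
    else pvFindFieldsRev rest

def extract_zeek_fields_py_alt (lines : List String) : List String × Int :=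
  let header := pvTakeHeader lines
  (pvFindFieldsRev header.reverse, (header.length : Int))

-- ===== PRECONDITION & SPEC =====
def Spec_extract_zeek_fields_py (lines : List String) (out : List String × Int) : Prop := out = extract_zeek_fields_py_alt lines
instance (lines : List String) (out : List String × Int) : Decidable (Spec_extract_zeek_fields_py lines out) := by unfold Spec_extract_zeek_fields_py; infer_instance

-- ===== CLAIM (what is proved, stated in full; the proofs are below) =====
def Claim_equal_extract_zeek_fields_py : Prop := ∀ (lines : List String), Dom_extract_zeek_fields_py lines → Spec_extract_zeek_fields_py lines (extract_zeek_fields_py lines)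

-- ===== LEMMAS AND PROOFS =====

-- optional-valued version of the reverse scan, for the proof only
def pvOptFind : List String → Option (List String)
  | [] => none
  | l :: rest =>
    if PySem.Str.startswith l "#fields" then some (((PySem.Str.split? l "\t").getD []).drop 1)
    else pvOptFind rest

theorem pvFindFieldsRev_eq (xs : List String) :
    pvFindFieldsRev xs = (pvOptFind xs).getD [] := by
  induction xs with
  | nil => rfl
  | cons l rest ih =>
    simp only [pvFindFieldsRev, pvOptFind]
    split <;> simp [ih]

theorem pvOptFind_append (xs : List String) (l : String) :
    pvOptFind (xs ++ [l]) =
      (pvOptFind xs).or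
        (if PySem.Str.startswith l "#fields" then some (((PySem.Str.split? l "\t").getD []).drop 1) else none) := by
  induction xs with
  | nil => simp [pvOptFind]
  | cons x rest ih =>
    simp only [List.cons_append, pvOptFind, ih]
    split <;> simp

theorem pvStartswith_hash {l : String}
    (h : PySem.Str.startswith l "#fields" = true) :
    PySem.Str.startswith l "#" = true := by
  simp only [PySem.Str.startswith_eq, PySem.Chars.startswith_iff] at h ⊢
  exact List.IsPrefix.trans (by decide) h

theorem pvALoop_eq (lines : List String) :
    ∀ (i : Int) (fields : List String),
      pvALoop lines i fields i =
        ((pvOptFind (pvTakeHeader lines).reverse).getD fields,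
          i + ((pvTakeHeader lines).length : Int)) := by
  induction lines with
  | nil => intro i fields; simp [pvALoop, pvTakeHeader, pvOptFind]
  | cons l rest ih =>
    intro i fields
    by_cases hf : PySem.Str.startswith l "#fields" = true
    · have hh := pvStartswith_hash hf
      rw [pvALoop, if_pos hf, ih, pvTakeHeader, if_pos hh]
      simp only [List.reverse_cons, pvOptFind_append, if_pos hf, List.length_cons]
      cases pvOptFind (pvTakeHeader rest).reverse <;> simp [Option.or] <;> omega
    · by_cases hh : PySem.Str.startswith l "#" = true
      · rw [pvALoop, if_neg hf, if_pos hh, ih, pvTakeHeader, if_pos hh]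
        simp only [List.reverse_cons, pvOptFind_append, if_neg hf, List.length_cons]
        cases pvOptFind (pvTakeHeader rest).reverse <;> simp [Option.or] <;> omega
      · rw [pvALoop, if_neg hf, if_neg hh, pvTakeHeader, if_neg hh]
        simp [pvOptFind]

-- ===== VERDICT (by name: the statement is the Claim_ definition above) =====
theorem extract_zeek_fields_py_spec : Claim_equal_extract_zeek_fields_py := by
  intro lines _
  show extract_zeek_fields_py lines = extract_zeek_fields_py_alt lines
  simp only [extract_zeek_fields_py, extract_zeek_fields_py_alt,
    pvALoop_eq lines 0 [], pvFindFieldsRev_eq]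
  simp
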